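-- pv_equiv track=rewrite | github.com/joshanashakya/dissertation | workspace/dataset/java-python/GeeksForGeeks/3034/A/2.py | isFactorialPrime
-- ===== SOURCE A (Python) =====
-- from math import sqrt
--
-- def isPrime(n) :
--
--     # Corner cases
--     if (n <= 1) :
--         return False
--
--     if (n <= 3) :
--         return True
--
--     # This is checked so that we can skip
--     # middle five numbers in below loop
--     if (n % 2 == 0 or n % 3 == 0) :
--         return False
--
--     for i in range(5, int(sqrt(n)) + 1, 6) :
--         if (n % i == 0 or n % (i + 2) == 0) :
--             return False
--
--     return True
--
-- def isFactorialPrime(n) :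
--
--     # If n is not prime then return false
--     if (not isPrime(n)) :
--         return False
--
--     fact = 1
--     i = 1
--     while (fact <= n + 1) :
--
--         # Calculate factorial
--         fact = fact * i
--
--         # If n is a factorial prime
--         if (n + 1 == fact or n - 1 == fact) :
--             return True
--
--         i += 1
--
--     # n is not a factorial prime
--     return False
-- ===== SOURCE B (Python) =====
-- from math import sqrt
--
-- def isPrime(n):
--
--     # Corner cases
--     if (n <= 1):
--         return False
--
--     if (n <= 3):
--         return True
--
--     # This is checked so that we can skip
--     # middle five numbers in below loop
--     if (n % 2 == 0 or n % 3 == 0):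
--         return False
--
--     for i in range(5, int(sqrt(n)) + 1, 6):
--         if (n % i == 0 or n % (i + 2) == 0):
--             return False
--
--     return True
--
-- def isFactorial(m):
--     # m (>= 1) is a factorial iff dividing by 2, 3, 4, ... in turn reaches 1
--     i = 2
--     while m > 1:
--         if m % i != 0:
--             return False
--         m //= i
--         i += 1
--     return True
--
-- def isFactorialPrime(n):
--     if not isPrime(n):
--         return False
--     return isFactorial(n - 1) or isFactorial(n + 1)
-- ===== Notes on version B (the rewrite author's own statement) =====
-- stated objective: alternative
-- what changed: A's upward while loop multiplies successive integers into a running factorial until it exceeds the neighbourhood of n and compares each product against n's neighbours; B instead tests each neighbour of n with a divide-down helper isFactorial that divides by successive integers starting at two and succeeds iff the quotient reaches one; isPrime is unchanged.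
import Mathlib
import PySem

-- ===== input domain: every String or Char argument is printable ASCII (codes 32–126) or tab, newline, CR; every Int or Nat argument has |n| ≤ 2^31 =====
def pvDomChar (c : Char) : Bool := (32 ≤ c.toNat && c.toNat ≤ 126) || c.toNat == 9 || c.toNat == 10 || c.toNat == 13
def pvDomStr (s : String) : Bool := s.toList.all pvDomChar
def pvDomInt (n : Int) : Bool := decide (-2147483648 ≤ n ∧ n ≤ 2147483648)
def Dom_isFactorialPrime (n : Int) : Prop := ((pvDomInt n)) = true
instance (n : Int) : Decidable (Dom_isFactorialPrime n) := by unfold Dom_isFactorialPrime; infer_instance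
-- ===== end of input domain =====

-- B replaces A's upward factorial-building while loop by a divide-down factorial test on each
-- neighbour of n (divide by successive integers until the quotient is one): a different
-- algorithm of similar cost (objective: alternative).

-- ===== PORT A =====
-- int(sqrt(n)): ported as Nat.sqrt on n.toNat — exact here, since isPrime only reaches it
-- for 3 < n, and for 0 ≤ n ≤ 2^31 (the stated domain) int(math.sqrt(n)) equals the integer
-- square root (double sqrt cannot round across an integer at this magnitude).
def pySqrtInt (n : Int) : Int := (Nat.sqrt n.toNat : Int)

-- the for-loop of isPrime with its early return
def trialLoop (n : Int) : List Int → Bool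
  | [] => true
  | i :: rest =>
    if PySem.Int.mod n i = 0 ∨ PySem.Int.mod n (i + 2) = 0 then false
    else trialLoop n rest

def isPrime (n : Int) : Bool :=
  if n ≤ 1 then false
  else if n ≤ 3 then true
  else if PySem.Int.mod n 2 = 0 ∨ PySem.Int.mod n 3 = 0 then false
  else trialLoop n (PySem.List.pyRange 5 (pySqrtInt n + 1) 6)

-- A's while loop; the Nat argument is fuel that only makes it total — (n+1).toNat + 2 steps
-- always suffice (proved below: aloop_fuel_iff never needs more).
def aloop (n fact i : Int) : Nat → Bool
  | 0 => false
  | fuel + 1 =>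
    if fact ≤ n + 1 then
      let fact' := fact * i
      if n + 1 = fact' ∨ n - 1 = fact' then true
      else aloop n fact' (i + 1) fuel
    else false

def isFactorialPrime (n : Int) : Bool :=
  if ¬ (isPrime n = true) then false
  else aloop n 1 1 ((n + 1).toNat + 2)

-- ===== PORT B =====
-- B's while loop; fuel m.toNat + 1 only makes it total (m strictly decreases each step).
def bloop (m i : Int) : Nat → Bool
  | 0 => false
  | fuel + 1 =>
    if 1 < m then
      if PySem.Int.mod m i ≠ 0 then false
      else bloop (PySem.Int.floordiv m i) (i + 1) fuel
    else true

def isFactorial (m : Int) : Bool := bloop m 2 (m.toNat + 1)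

def isFactorialPrime_alt (n : Int) : Bool :=
  if ¬ (isPrime n = true) then false
  else isFactorial (n - 1) || isFactorial (n + 1)

-- ===== PRECONDITION & SPEC =====
def Spec_isFactorialPrime (n : Int) (out : Bool) : Prop := out = isFactorialPrime_alt n
instance (n : Int) (out : Bool) : Decidable (Spec_isFactorialPrime n out) := by unfold Spec_isFactorialPrime; infer_instance

-- ===== CLAIM (what is proved, stated in full; the proofs are below) =====
def Claim_equal_isFactorialPrime : Prop := ∀ (n : Int), Dom_isFactorialPrime n → Spec_isFactorialPrime n (isFactorialPrime n)

-- ===== LEMMAS AND PROOFS =====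

def facZ (k : Nat) : Int := (Nat.factorial k : Int)

-- rising product i * (i+1) * ... * (i+t-1)
def ascFac : Int → Nat → Int
  | _, 0 => 1
  | i, t + 1 => i * ascFac (i + 1) t

theorem facZ_pos (k : Nat) : 1 ≤ facZ k := by
  unfold facZ
  exact_mod_cast Nat.one_le_iff_ne_zero.mpr (Nat.factorial_ne_zero k)

theorem facZ_mono {j k : Nat} (h : j ≤ k) : facZ j ≤ facZ k := by
  unfold facZ
  exact_mod_cast Nat.factorial_le h

theorem facZ_succ (j : Nat) : facZ (j + 1) = facZ j * ((j : Int) + 1) := by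
  unfold facZ
  rw [Nat.factorial_succ]
  push_cast
  ring

theorem ascFac_two (t : Nat) : ascFac 2 t = facZ (t + 1) := by
  have key : ∀ (t j : Nat), facZ j * ascFac ((j : Int) + 1) t = facZ (j + t) := by
    intro t
    induction t with
    | zero => intro j; simp [ascFac]
    | succ s ih =>
      intro j
      have h2 := ih (j + 1)
      simp only [ascFac]
      have : facZ j * (((j : Int) + 1) * ascFac ((j : Int) + 1 + 1) s)
          = facZ (j + 1) * ascFac (((j + 1 : Nat) : Int) + 1) s := by
        rw [facZ_succ]; push_cast; ring
      rw [this, h2]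
      congr 1
      omega
  have e1 : facZ 1 = 1 := by simp [facZ, Nat.factorial]
  have h := key t 1
  rw [e1, one_mul] at h
  push_cast at h
  rw [Nat.add_comm 1 t] at h
  exact h

theorem isPrime_two_le {n : Int} (h : isPrime n = true) : 2 ≤ n := by
  by_contra hlt
  push Not at hlt
  unfold isPrime at h
  rw [if_pos (by omega)] at h
  exact Bool.false_ne_true h

theorem bloop_iff : ∀ (fuel : Nat) (m i : Int), 2 ≤ i → 1 ≤ m → m.toNat + 1 ≤ fuel →
    (bloop m i fuel = true ↔ ∃ t, m = ascFac i t) := by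
  intro fuel
  induction fuel with
  | zero => intro m i _ _ hf; omega
  | succ f ih =>
    intro m i hi hm hf
    by_cases h1 : 1 < m
    · by_cases hdvd : i ∣ m
      · have hmodz : PySem.Int.mod m i = 0 := (PySem.Int.mod_eq_zero_iff_dvd m i).mpr hdvd
        have hdiv : PySem.Int.floordiv m i = m / i :=
          PySem.Int.floordiv_eq_ediv_of_pos (by omega : (0:Int) < i)
        have hmul : i * (m / i) = m := Int.mul_ediv_cancel' hdvd
        have hq1 : 1 ≤ m / i := by
          by_contra hq
          push Not at hq
          have hq0 : m / i ≤ 0 := by omega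
          nlinarith
        have hlt : m / i < m := by nlinarith [hmul]
        have hrec := ih (m / i) (i + 1) (by omega) hq1 (by omega)
        have hstep : bloop m i (f + 1) = bloop (m / i) (i + 1) f := by
          simp only [bloop, hmodz, hdiv, if_pos h1]
          simp
        rw [hstep, hrec]
        constructor
        · rintro ⟨t, ht⟩
          exact ⟨t + 1, by simp only [ascFac]; rw [← ht, hmul]⟩
        · rintro ⟨t, ht⟩
          match t with
          | 0 => simp [ascFac] at ht; omega
          | s + 1 =>
            refine ⟨s, ?_⟩
            simp only [ascFac] at ht
            rw [ht, Int.mul_ediv_cancel_left _ (by omega : i ≠ 0)]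
      · have hmodnz : PySem.Int.mod m i ≠ 0 := fun h => hdvd ((PySem.Int.mod_eq_zero_iff_dvd m i).mp h)
        have hstep : bloop m i (f + 1) = false := by
          simp only [bloop, if_pos h1, if_pos hmodnz]
        rw [hstep]
        constructor
        · intro hb; exact absurd hb (by simp)
        · rintro ⟨t, ht⟩
          exfalso
          match t with
          | 0 => simp [ascFac] at ht; omega
          | s + 1 => exact hdvd ⟨ascFac (i + 1) s, by simpa [ascFac] using ht⟩
    · have hstep : bloop m i (f + 1) = true := by
        simp only [bloop, if_neg h1]
      rw [hstep]
      have hm1 : m = 1 := by omega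
      exact ⟨fun _ => ⟨0, by simp [ascFac, hm1]⟩, fun _ => rfl⟩

theorem aloop_iff : ∀ (fuel : Nat) (n : Int) (j : Nat),
    (n + 2 - facZ j).toNat + (if j = 0 then 1 else 0) + 1 ≤ fuel →
    (aloop n (facZ j) ((j : Int) + 1) fuel = true ↔
      ∃ k, j + 1 ≤ k ∧ (n + 1 = facZ k ∨ n - 1 = facZ k)) := by
  intro fuel
  induction fuel with
  | zero => intro n j hf; split at hf <;> omega
  | succ f ih =>
    intro n j hf
    by_cases hle : facZ j ≤ n + 1
    · have hfact' : facZ j * ((j : Int) + 1) = facZ (j + 1) := (facZ_succ j).symm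
      by_cases hhit : n + 1 = facZ j * ((j : Int) + 1) ∨ n - 1 = facZ j * ((j : Int) + 1)
      · have hstep : aloop n (facZ j) ((j : Int) + 1) (f + 1) = true := by
          simp only [aloop, if_pos hle, if_pos hhit]
        rw [hstep]
        rw [hfact'] at hhit
        exact ⟨fun _ => ⟨j + 1, le_refl _, hhit⟩, fun _ => rfl⟩
      · have hstep : aloop n (facZ j) ((j : Int) + 1) (f + 1)
            = aloop n (facZ j * ((j : Int) + 1)) (((j : Int) + 1) + 1) f := by
          simp only [aloop, if_pos hle, if_neg hhit]
        rw [hfact'] at hhit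
        push Not at hhit
        have hfuel' : (n + 2 - facZ (j + 1)).toNat + (if j + 1 = 0 then 1 else 0) + 1 ≤ f := by
          rw [if_neg (Nat.succ_ne_zero j)]
          by_cases hj : j = 0
          · subst hj
            have e1 : facZ 1 = 1 := by simp [facZ, Nat.factorial]
            have e0 : facZ 0 = 1 := by simp [facZ, Nat.factorial]
            rw [e1]
            rw [if_pos rfl, e0] at hf
            omega
          · rw [if_neg hj] at hf
            have h1 := facZ_pos j
            have h2 : facZ j + 1 ≤ facZ (j + 1) := by
              rw [facZ_succ j]
              have hj2 : (2 : Int) ≤ (j : Int) + 1 := by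
                exact_mod_cast Nat.succ_le_succ (Nat.one_le_iff_ne_zero.mpr hj)
              nlinarith
            omega
        have hrec := ih n (j + 1) hfuel'
        have hcast : (((j + 1 : Nat) : Int) + 1) = ((j : Int) + 1) + 1 := by push_cast; ring
        rw [hcast, ← hfact'] at hrec
        rw [hstep, hrec]
        constructor
        · rintro ⟨k, hk, hor⟩; exact ⟨k, by omega, hor⟩
        · rintro ⟨k, hk, hor⟩
          refine ⟨k, ?_, hor⟩
          rcases Nat.lt_or_ge k (j + 2) with hlt | hge
          · have hkj : k = j + 1 := by omega
            subst hkj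
            rcases hor with h | h
            · exact absurd h hhit.1
            · exact absurd h hhit.2
          · omega
    · have hstep : aloop n (facZ j) ((j : Int) + 1) (f + 1) = false := by
        simp only [aloop, if_neg hle]
      rw [hstep]
      constructor
      · intro hb; exact absurd hb (by simp)
      · rintro ⟨k, hk, hor⟩
        exfalso
        have : facZ j ≤ facZ k := facZ_mono (by omega)
        rcases hor with h | h <;> omega

-- ===== VERDICT (by name: the statement is the Claim_ definition above) =====
theorem isFactorialPrime_spec : Claim_equal_isFactorialPrime := by
  unfold Claim_equal_isFactorialPrime Spec_isFactorialPrime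
  intro n _
  unfold isFactorialPrime isFactorialPrime_alt
  by_cases hp : isPrime n = true
  · rw [if_neg (by simp [hp]), if_neg (by simp [hp])]
    have hn : 2 ≤ n := isPrime_two_le hp
    have e0 : facZ 0 = 1 := by simp [facZ, Nat.factorial]
    have hA := aloop_iff ((n + 1).toNat + 2) n 0 (by rw [if_pos rfl, e0]; omega)
    rw [e0] at hA
    simp only [Nat.cast_zero, zero_add] at hA
    have hB1 := bloop_iff ((n - 1).toNat + 1) (n - 1) 2 (by omega) (by omega) (le_refl _)
    have hB2 := bloop_iff ((n + 1).toNat + 1) (n + 1) 2 (by omega) (by omega) (le_refl _)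
    rw [Bool.eq_iff_iff, hA]
    unfold isFactorial
    rw [Bool.or_eq_true, hB1, hB2]
    constructor
    · rintro ⟨k, hk, hor⟩
      obtain ⟨t, rfl⟩ : ∃ t, k = t + 1 := ⟨k - 1, by omega⟩
      rcases hor with h | h
      · right; exact ⟨t, by rw [ascFac_two]; exact h⟩
      · left; exact ⟨t, by rw [ascFac_two]; exact h⟩
    · rintro (⟨t, ht⟩ | ⟨t, ht⟩)
      · rw [ascFac_two] at ht
        exact ⟨t + 1, by omega, Or.inr ht⟩
      · rw [ascFac_two] at ht
        exact ⟨t + 1, by omega, Or.inl ht⟩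
  · rw [if_pos (by simp [hp]), if_pos (by simp [hp])]
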